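-- pv_equiv track=rewrite | github.com/Johnhyeon/stocklens-dart-mcp | dart_mcp_server/server.py | _dedup_account_rows
-- ===== SOURCE A (Python) =====
-- def _dedup_account_rows(items: list[dict]) -> list[dict]:
--     """DART fnlttSinglAcnt가 동일 항목을 두 번 내려보내는 노이즈 제거.
--
--     예: 삼성전자 사업보고서에서 '당기순이익(손실)'이 IS 안에 ord=29와 ord=61로 두 번 박힘.
--     fs_div, sj_div, account_nm, 모든 amount가 100% 같음 (ord만 다름).
--
--     안전을 위해 6중 키가 정확히 일치할 때만 dedup. amount 한 글자라도 다르면 보존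
--     (지배/비지배 구분 같은 의미 있는 행일 수 있음). 낮은 ord 우선 보존.
--     """
--     seen: dict[tuple, tuple[int, dict]] = {}
--     for r in items:
--         key = (
--             (r.get("fs_div") or "").strip(),
--             (r.get("sj_div") or "").strip(),
--             (r.get("account_nm") or "").strip(),
--             (r.get("thstrm_amount") or "").strip(),
--             (r.get("frmtrm_amount") or "").strip(),
--             (r.get("bfefrmtrm_amount") or "").strip(),
--         )
--         try:
--             ord_val = int(r.get("ord", "999") or 999)
--         except (TypeError, ValueError):
--             ord_val = 999
--         existing = seen.get(key)
--         if existing is None or ord_val < existing[0]: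
--             seen[key] = (ord_val, r)
--     return [v[1] for v in seen.values()]
-- ===== SOURCE B (Python) =====
-- def _dedup_account_rows(items: list[dict]) -> list[dict]:
--     """Two-pass variant: bucket rows per 6-key, then pick the lowest-ord row per bucket."""
--     buckets: dict[tuple, list[tuple[int, dict]]] = {}
--     for r in items:
--         key = (
--             (r.get("fs_div") or "").strip(),
--             (r.get("sj_div") or "").strip(),
--             (r.get("account_nm") or "").strip(),
--             (r.get("thstrm_amount") or "").strip(),
--             (r.get("frmtrm_amount") or "").strip(),
--             (r.get("bfefrmtrm_amount") or "").strip(),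
--         )
--         try:
--             ord_val = int(r.get("ord", "999") or 999)
--         except (TypeError, ValueError):
--             ord_val = 999
--         buckets.setdefault(key, []).append((ord_val, r))
--     return [min(b, key=lambda t: t[0])[1] for b in buckets.values()]
-- ===== Notes on version B (the rewrite author's own statement) =====
-- stated objective: alternative
-- what changed: B replaces A's streaming compare-and-replace running minimum per key with a build-full-buckets-then-reduce structure: one pass groups every (ord,row) pair into a dict of buckets keyed on the 6-tuple, a second pass picks min(bucket, key=ord) per bucket; Python's first-minimal min and dict insertion order reproduce A's first-wins strict-< behaviour exactly.
import Mathlib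
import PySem

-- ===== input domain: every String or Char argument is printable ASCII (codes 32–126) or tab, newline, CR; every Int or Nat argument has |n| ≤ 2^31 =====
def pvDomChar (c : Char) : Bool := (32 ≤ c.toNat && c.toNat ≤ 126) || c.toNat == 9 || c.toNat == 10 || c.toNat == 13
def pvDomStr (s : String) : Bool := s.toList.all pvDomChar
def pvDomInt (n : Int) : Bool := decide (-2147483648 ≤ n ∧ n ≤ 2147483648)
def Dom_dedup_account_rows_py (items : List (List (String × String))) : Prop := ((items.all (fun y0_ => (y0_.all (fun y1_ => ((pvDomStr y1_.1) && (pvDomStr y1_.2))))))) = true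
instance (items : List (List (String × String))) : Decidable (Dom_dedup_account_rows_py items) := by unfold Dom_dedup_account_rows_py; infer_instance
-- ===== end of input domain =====

-- B restructures A's streaming per-key running minimum into bucket-everything-then-take-min; return values proved equal.

-- shared helpers: both Pythons parse the 6-key and ord identically
def pvRowGet (r : List (String × String)) (k : String) : Option String :=
  (PySem.Dict.mk r).get? k

def pvKeyPart (r : List (String × String)) (f : String) : String :=
  PySem.Str.strip ((pvRowGet r f).getD "")

def pvRowKey (r : List (String × String)) :
    String × String × String × String × String × String :=
  (pvKeyPart r "fs_div", pvKeyPart r "sj_div", pvKeyPart r "account_nm",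
   pvKeyPart r "thstrm_amount", pvKeyPart r "frmtrm_amount", pvKeyPart r "bfefrmtrm_amount")

def pvOrdVal (r : List (String × String)) : Int :=
  let v := (pvRowGet r "ord").getD "999"
  if v = "" then 999
  else match PySem.Int.ofStr? v with
       | some n => n
       | none => 999

-- ===== PORT A =====
def dedup_account_rows_py (items : List (List (String × String))) : List (List (String × String)) :=
  let seen : PySem.Dict (String × String × String × String × String × String)
      (Int × List (String × String)) :=
    items.foldl (fun seen r =>
      let k := pvRowKey r
      let o := pvOrdVal r
      match seen.get? k with
      | none => seen.insert k (o, r)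
      | some e => if o < e.1 then seen.insert k (o, r) else seen) PySem.Dict.empty
  seen.values.map (fun v => v.2)

-- ===== PORT B =====
def dedup_account_rows_py_alt (items : List (List (String × String))) : List (List (String × String)) :=
  let buckets : PySem.Dict (String × String × String × String × String × String)
      (List (Int × List (String × String))) :=
    items.foldl (fun d r => d.modify (pvRowKey r) [] (fun b => b ++ [(pvOrdVal r, r)]))
      PySem.Dict.empty
  buckets.values.map (fun b =>
    match PySem.List.min? b (fun t => t.1) with
    | some m => m.2
    | none => [])

-- ===== PRECONDITION & SPEC =====
def Spec_dedup_account_rows_py (items : List (List (String × String))) (out : List (List (String × String))) : Prop := out = dedup_account_rows_py_alt items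
instance (items : List (List (String × String))) (out : List (List (String × String))) : Decidable (Spec_dedup_account_rows_py items out) := by unfold Spec_dedup_account_rows_py; infer_instance

-- ===== CLAIM (what is proved, stated in full; the proofs are below) =====
def Claim_equal_dedup_account_rows_py : Prop := ∀ (items : List (List (String × String))), Dom_dedup_account_rows_py items → Spec_dedup_account_rows_py items (dedup_account_rows_py items)

-- ===== LEMMAS AND PROOFS =====

-- abbreviations used only by the proofs
abbrev pvKey := String × String × String × String × String × String
abbrev pvRow := List (String × String)

def pvPair (r : pvRow) : Int × pvRow := (pvOrdVal r, r)

def pvStep (acc : Option (Int × pvRow)) (p : Int × pvRow) : Option (Int × pvRow) :=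
  match acc with
  | none => some p
  | some m => if p.1 < m.1 then some p else some m

def pvFoldA (l : List pvRow) (d : PySem.Dict pvKey (Int × pvRow)) :
    PySem.Dict pvKey (Int × pvRow) :=
  l.foldl (fun seen r =>
    match seen.get? (pvRowKey r) with
    | none => seen.insert (pvRowKey r) (pvPair r)
    | some e => if pvOrdVal r < e.1 then seen.insert (pvRowKey r) (pvPair r) else seen) d

def pvFoldB (l : List pvRow) : PySem.Dict pvKey (List (Int × pvRow)) :=
  l.foldl (fun d r => d.modify (pvRowKey r) [] (fun b => b ++ [(pvOrdVal r, r)])) PySem.Dict.empty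

lemma pvFoldA_eq (items : List pvRow) :
    dedup_account_rows_py items =
      (pvFoldA items PySem.Dict.empty).values.map (fun v => v.2) := rfl

lemma pvFoldB_eq (items : List pvRow) :
    dedup_account_rows_py_alt items =
      (pvFoldB items).values.map (fun b =>
        match PySem.List.min? b (fun t => t.1) with
        | some m => m.2
        | none => []) := rfl

-- the loop body of A, at key k, is pvStep on the get? value
lemma pvFoldA_get? (l : List pvRow) (d : PySem.Dict pvKey (Int × pvRow)) (k : pvKey) :
    (pvFoldA l d).get? k =
      ((l.filter (fun r => pvRowKey r == k)).map pvPair).foldl pvStep (d.get? k) := by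
  induction l generalizing d with
  | nil => rfl
  | cons r t ih =>
    simp only [pvFoldA, List.foldl_cons, List.filter_cons]
    by_cases hk : pvRowKey r = k
    · subst hk
      simp only [beq_self_eq_true, if_pos, List.map_cons, List.foldl_cons]
      have hbody : ∀ d' : PySem.Dict pvKey (Int × pvRow),
          ((match d'.get? (pvRowKey r) with
            | none => d'.insert (pvRowKey r) (pvPair r)
            | some e => if pvOrdVal r < e.1 then d'.insert (pvRowKey r) (pvPair r) else d')).get? (pvRowKey r)
            = pvStep (d'.get? (pvRowKey r)) (pvPair r) := by
        intro d'
        cases hg : d'.get? (pvRowKey r) with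
        | none => simp [pvStep, PySem.Dict.get?_insert]
        | some e =>
          by_cases ho : pvOrdVal r < e.1
          · simp [pvStep, PySem.Dict.get?_insert, ho, pvPair]
          · simp [pvStep, ho, pvPair, hg]
      rw [show (List.foldl _ _ t : PySem.Dict pvKey (Int × pvRow)) = pvFoldA t _ from rfl,
        ih, hbody d]
    · have hne : (pvRowKey r == k) = false := by simp [hk]
      simp only [hne, Bool.false_eq_true, if_neg, not_false_iff]
      rw [show (List.foldl _ _ t : PySem.Dict pvKey (Int × pvRow)) = pvFoldA t _ from rfl, ih]
      congr 1
      cases hg : d.get? (pvRowKey r) with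
      | none => rw [PySem.Dict.get?_insert, if_neg (fun h => hk h.symm)]
      | some e =>
        by_cases ho : pvOrdVal r < e.1
        · simp only [ho, if_pos]
          rw [PySem.Dict.get?_insert, if_neg (fun h => hk h.symm)]
        · simp [ho]

lemma pvFoldA_keys (l : List pvRow) (d : PySem.Dict pvKey (Int × pvRow)) :
    (pvFoldA l d).keys = PySem.Set.update d.keys (l.map pvRowKey) := by
  induction l generalizing d with
  | nil => rfl
  | cons r t ih =>
    simp only [pvFoldA, List.foldl_cons, List.map_cons, PySem.Set.update, List.foldl_cons]
    rw [show (List.foldl _ _ t : PySem.Dict pvKey (Int × pvRow)) = pvFoldA t _ from rfl, ih]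
    congr 1
    cases hg : d.get? (pvRowKey r) with
    | none =>
      have hmem : pvRowKey r ∉ d.keys := (PySem.Dict.get?_eq_none_iff_not_mem_keys d _).mp hg
      have hc : d.contains (pvRowKey r) = false := by
        rw [PySem.Dict.contains_eq_isSome_get?, hg]; rfl
      have hkeys : (d.insert (pvRowKey r) (pvPair r)).keys = d.keys ++ [pvRowKey r] := by
        simp only [PySem.Dict.keys, PySem.Dict.items_insert, hc, Bool.false_eq_true, if_neg,
          not_false_iff, List.map_append, List.map_cons, List.map_nil]
      rw [hkeys]
      simp [PySem.Set.add, PySem.Set.contains, hmem]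
    | some e =>
      have hmem : pvRowKey r ∈ d.keys := by
        by_contra hn
        simp [(PySem.Dict.get?_eq_none_iff_not_mem_keys d _).mpr hn] at hg
      have hc : d.contains (pvRowKey r) = true := by
        rw [PySem.Dict.contains_eq_isSome_get?, hg]; rfl
      have hset : PySem.Set.add d.keys (pvRowKey r) = d.keys := by
        simp [PySem.Set.add, PySem.Set.contains, hmem]
      by_cases ho : pvOrdVal r < e.1
      · simp only [ho, if_pos]
        rw [hset]
        simp only [PySem.Dict.keys, PySem.Dict.items_insert, hc, if_pos, List.map_map]
        apply List.map_congr_left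
        intro p _
        by_cases hp : p.1 = pvRowKey r
        · simp [Function.comp, hp]
        · simp [Function.comp, hp]
      · simp [ho, hset]

lemma pvFoldB_getD (items : List pvRow) (k : pvKey) :
    (pvFoldB items).getD k [] =
      (items.filter (fun r => pvRowKey r == k)).map pvPair := by
  have h1 : pvFoldB items
      = (items.map (fun r => (pvRowKey r, pvPair r))).foldl
          (fun d p => d.modify p.1 [] (fun b => b ++ [p.2])) PySem.Dict.empty := by
    rw [List.foldl_map]
    rfl
  rw [h1, PySem.Dict.getD_foldl_modify_append]
  have h2 : (List.filter (fun p => p.1 == k) (items.map (fun r => (pvRowKey r, pvPair r))))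
      = (items.filter (fun r => pvRowKey r == k)).map (fun r => (pvRowKey r, pvPair r)) := by
    rw [List.filter_map]
    rfl
  rw [h2]
  simp [List.map_map, Function.comp]

lemma pvFoldB_keys (items : List pvRow) :
    (pvFoldB items).keys = PySem.Set.ofList (items.map pvRowKey) := by
  have h := PySem.Dict.keys_foldl_modify_key items pvRowKey []
    (fun d r b => b ++ [(pvOrdVal r, r)])
    (PySem.Dict.empty : PySem.Dict pvKey (List (Int × pvRow)))
  simpa [pvFoldB, PySem.Dict.keys_empty] using h

theorem pv_main (items : List pvRow) :
    dedup_account_rows_py items = dedup_account_rows_py_alt items := by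
  rw [pvFoldA_eq, pvFoldB_eq]
  have hAkeys : (pvFoldA items PySem.Dict.empty).keys
      = PySem.Set.ofList (items.map pvRowKey) := by
    rw [pvFoldA_keys]; rfl
  have hBnodup : (pvFoldB items).keys.Nodup := by
    rw [pvFoldB_keys]
    exact PySem.Set.nodup_ofList _
  have hAnodup : (pvFoldA items PySem.Dict.empty).keys.Nodup := by
    rw [hAkeys]
    exact PySem.Set.nodup_ofList _
  rw [PySem.Dict.values_eq_map_keys _ hAnodup (999, []),
      PySem.Dict.values_eq_map_keys _ hBnodup []]
  rw [hAkeys, pvFoldB_keys, List.map_map, List.map_map]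
  apply List.map_congr_left
  intro k hk
  have hkmem : k ∈ items.map pvRowKey := (PySem.Set.mem_ofList _ _).mp hk
  obtain ⟨r0, hr0, hkr0⟩ := List.mem_map.mp hkmem
  have hbne : ((items.filter (fun r => pvRowKey r == k)).map pvPair) ≠ [] := by
    have : r0 ∈ items.filter (fun r => pvRowKey r == k) :=
      List.mem_filter.mpr ⟨hr0, by simp [hkr0]⟩
    intro hnil
    rw [List.map_eq_nil_iff.mp hnil] at this
    exact absurd this (List.not_mem_nil)
  have hAe : (pvFoldA items PySem.Dict.empty).get? k
      = PySem.List.min? ((items.filter (fun r => pvRowKey r == k)).map pvPair) (fun t => t.1) := by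
    rw [pvFoldA_get?, PySem.Dict.get?_empty]
    unfold PySem.List.min? pvStep
    congr 1
    funext acc p
    cases acc <;> rfl
  obtain ⟨m, hm⟩ : ∃ m, PySem.List.min?
      ((items.filter (fun r => pvRowKey r == k)).map pvPair) (fun t => t.1) = some m := by
    cases hmin : PySem.List.min? ((items.filter (fun r => pvRowKey r == k)).map pvPair) (fun t => t.1) with
    | none => exact absurd ((PySem.List.min?_eq_none_iff _ _).mp hmin) hbne
    | some m => exact ⟨m, rfl⟩
  simp only [Function.comp_apply]
  rw [pvFoldB_getD, hm]
  have hgd : (pvFoldA items PySem.Dict.empty).getD k (999, []) = m := by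
    simp only [PySem.Dict.getD]
    rw [hAe, hm]
    rfl
  rw [hgd]

-- ===== VERDICT (by name: the statement is the Claim_ definition above) =====
theorem dedup_account_rows_py_spec : Claim_equal_dedup_account_rows_py := by
  intro items _
  unfold Spec_dedup_account_rows_py
  exact pv_main items
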